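-- pv_equiv track=rewrite | github.com/tzou2024/aOc | 2023/day3/script.py | get_line_island
-- ===== SOURCE A (Python) =====
-- def get_line_island(line):
--     #return list of tuples of start and end of islands in a list
--     onnumber = False
--     starts = []
--     ends = []
--     i = 0
--     while i < len(line):
--         if line[i].isdigit():
--             starts.append(i)
--             while line[i].isdigit():
--                 i+=1
--                 if i == len(line):
--                     break
--             ends.append(i-1)
--         i += 1
--     combos = []
--     for (a,b) in zip(starts, ends):
--         combos.append((a,b))
--     return combos
-- ===== SOURCE B (Python) =====
-- from itertools import groupby
--
-- def get_line_island(line):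
--     # idiomatic: split the line into maximal same-class runs with groupby
--     res = []
--     i = 0
--     for key, grp in groupby(line, key=str.isdigit):
--         n = sum(1 for _ in grp)
--         if key:
--             res.append((i, i + n - 1))
--         i += n
--     return res
-- ===== Notes on version B (the rewrite author's own statement) =====
-- stated objective: idiomatic
-- what changed: Replaced A's nested index-driven while loops with two parallel lists zipped at the end by a single itertools.groupby pass over maximal same-class runs, emitting each digit run's (start, end) directly.
import Mathlib
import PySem

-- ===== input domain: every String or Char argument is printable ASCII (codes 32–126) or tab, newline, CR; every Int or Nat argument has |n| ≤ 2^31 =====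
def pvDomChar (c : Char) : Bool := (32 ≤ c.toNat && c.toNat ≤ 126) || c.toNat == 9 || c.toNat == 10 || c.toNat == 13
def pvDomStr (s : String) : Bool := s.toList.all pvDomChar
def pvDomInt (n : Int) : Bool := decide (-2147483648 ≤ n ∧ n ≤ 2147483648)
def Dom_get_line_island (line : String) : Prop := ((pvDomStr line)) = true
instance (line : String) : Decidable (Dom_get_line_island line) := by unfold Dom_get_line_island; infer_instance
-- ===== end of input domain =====

-- B replaces A's nested index-driven while loops (two lists zipped at the end) by one pass
-- over maximal same-class runs (itertools.groupby), emitting each digit run's pair directly (idiomatic).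

-- ===== PORT A =====
-- inner 'while line[i].isdigit(): i += 1; if i == len(line): break' — the bound check is folded
-- into the guard, exact because Python breaks at i == len(line) before ever indexing there
def pvAInner (cs : List Char) (i : Nat) : Nat :=
  if h : i < cs.length then
    if PySem.Chars.isdigit cs[i] then pvAInner cs (i + 1) else i
  else i
termination_by cs.length - i

-- (cited by pvAOuter's decreasing_by, so it stays above the port)
theorem pvAInner_bounds (cs : List Char) : ∀ (k i : Nat), cs.length - i ≤ k → i ≤ cs.length →
    i ≤ pvAInner cs i ∧ pvAInner cs i ≤ cs.length := by
  intro k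
  induction k with
  | zero =>
    intro i hk hle
    have hi : ¬ i < cs.length := by omega
    rw [pvAInner, dif_neg hi]; omega
  | succ k ih =>
    intro i hk hle
    by_cases h : i < cs.length
    · rw [pvAInner, dif_pos h]
      by_cases hd : PySem.Chars.isdigit cs[i] = true
      · rw [if_pos hd]
        have := ih (i + 1) (by omega) (by omega)
        omega
      · rw [if_neg hd]; omega
    · rw [pvAInner, dif_neg h]; omega

theorem pvAInner_gt (cs : List Char) (i : Nat) (h : i < cs.length)
    (hd : PySem.Chars.isdigit cs[i] = true) : i < pvAInner cs i ∧ pvAInner cs i ≤ cs.length := by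
  rw [pvAInner, dif_pos h, if_pos hd]
  have := pvAInner_bounds cs (cs.length - (i + 1)) (i + 1) (by omega) (by omega)
  omega

-- the outer while loop; state (i, starts, ends)
def pvAOuter (cs : List Char) (i : Nat) (starts ends : List Int) : List Int × List Int :=
  if h : i < cs.length then
    if hd : PySem.Chars.isdigit cs[i] then
      pvAOuter cs (pvAInner cs i + 1) (starts ++ [(i : Int)]) (ends ++ [((pvAInner cs i : Int)) - 1])
    else
      pvAOuter cs (i + 1) starts ends
  else (starts, ends)
termination_by cs.length - i
decreasing_by
  · have := pvAInner_gt cs i h hd; omega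
  · omega

def get_line_island (line : String) : List (Int × Int) :=
  let (starts, ends) := pvAOuter line.toList 0 [] []
  (starts.zip ends).foldl (fun combos ab => combos ++ [ab]) []

-- ===== PORT B =====
-- groupby(line, key=str.isdigit): each step takes the maximal run sharing the head's key
def pvBLoop (cs : List Char) (i : Int) : List (Int × Int) :=
  match cs with
  | [] => []
  | c :: rest =>
    let k := PySem.Chars.isdigit c
    let n := 1 + (rest.takeWhile (fun x => PySem.Chars.isdigit x == k)).length
    let tail := rest.dropWhile (fun x => PySem.Chars.isdigit x == k)
    (if k then [((i : Int), i + (n : Int) - 1)] else []) ++ pvBLoop tail (i + (n : Int))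
termination_by cs.length
decreasing_by
  simp only [List.length_cons]
  have := List.length_dropWhile_le (p := fun x => PySem.Chars.isdigit x == PySem.Chars.isdigit c) (l := rest)
  omega

def get_line_island_alt (line : String) : List (Int × Int) := pvBLoop line.toList 0

-- ===== PRECONDITION & SPEC =====
def Spec_get_line_island (line : String) (out : List (Int × Int)) : Prop := out = get_line_island_alt line
instance (line : String) (out : List (Int × Int)) : Decidable (Spec_get_line_island line out) := by unfold Spec_get_line_island; infer_instance

-- ===== CLAIM (what is proved, stated in full; the proofs are below) =====
def Claim_equal_get_line_island : Prop := ∀ (line : String), Dom_get_line_island line → Spec_get_line_island line (get_line_island line)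

-- ===== LEMMAS AND PROOFS =====

-- the inner while loop scans exactly the maximal digit run starting at i
theorem pvAInner_char (cs : List Char) : ∀ (k i : Nat), cs.length - i ≤ k →
    pvAInner cs i = i + ((cs.drop i).takeWhile PySem.Chars.isdigit).length := by
  intro k
  induction k with
  | zero =>
    intro i hk
    have hi : ¬ i < cs.length := by omega
    rw [pvAInner, dif_neg hi, List.drop_eq_nil_of_le (by omega)]
    simp
  | succ k ih =>
    intro i hk
    by_cases h : i < cs.length
    · rw [pvAInner, dif_pos h, List.drop_eq_getElem_cons h]
      by_cases hd : PySem.Chars.isdigit cs[i] = true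
      · rw [if_pos hd, List.takeWhile_cons_of_pos hd, ih (i + 1) (by omega)]
        simp; omega
      · rw [if_neg hd, List.takeWhile_cons_of_neg (by simp [hd])]
        simp
    · rw [pvAInner, dif_neg h, List.drop_eq_nil_of_le (by omega)]
      simp

-- where the inner loop stops, the character (if any) is not a digit
theorem pvAInner_stop (cs : List Char) (i : Nat) (h : pvAInner cs i < cs.length) :
    PySem.Chars.isdigit (cs[pvAInner cs i]'h) = false := by
  have : ∀ (k i : Nat), cs.length - i ≤ k → ∀ (hlt : pvAInner cs i < cs.length),
      PySem.Chars.isdigit (cs[pvAInner cs i]'hlt) = false := by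
    intro k
    induction k with
    | zero =>
      intro i hk hlt
      have hi : ¬ i < cs.length := by omega
      rw [pvAInner, dif_neg hi] at hlt
      omega
    | succ k ih =>
      intro i hk hlt
      by_cases hi : i < cs.length
      · by_cases hd : PySem.Chars.isdigit cs[i] = true
        · have heq : pvAInner cs i = pvAInner cs (i + 1) := by
            rw [pvAInner, dif_pos hi, if_pos hd]
          rw [heq] at hlt
          have := ih (i + 1) (by omega) hlt
          simp only [heq]
          exact this
        · have heq : pvAInner cs i = i := by
            rw [pvAInner, dif_pos hi, if_neg hd]
          rw [heq] at hlt
          simp only [heq]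
          simpa using hd
      · rw [pvAInner, dif_neg hi] at hlt; omega
  exact this (cs.length - i) i (by omega) h

-- accumulator lemma: pvAOuter only appends to its accumulators
theorem pvAOuter_acc (cs : List Char) : ∀ (k i : Nat), cs.length - i ≤ k → ∀ (starts ends : List Int),
    pvAOuter cs i starts ends =
      (starts ++ (pvAOuter cs i [] []).1, ends ++ (pvAOuter cs i [] []).2) := by
  intro k
  induction k with
  | zero =>
    intro i hk starts ends
    have hi : ¬ i < cs.length := by omega
    rw [pvAOuter, dif_neg hi, pvAOuter, dif_neg hi]
    simp
  | succ k ih =>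
    intro i hk starts ends
    by_cases h : i < cs.length
    · by_cases hd : PySem.Chars.isdigit cs[i] = true
      · have hj := pvAInner_gt cs i h hd
        rw [pvAOuter, dif_pos h, dif_pos hd]
        conv_rhs => rw [pvAOuter, dif_pos h, dif_pos hd]
        rw [ih (pvAInner cs i + 1) (by omega), ih (pvAInner cs i + 1) (by omega) ([] ++ [(i : Int)])]
        simp
      · rw [pvAOuter, dif_pos h, dif_neg hd]
        conv_rhs => rw [pvAOuter, dif_pos h, dif_neg hd]
        exact ih (i + 1) (by omega) starts ends
    · rw [pvAOuter, dif_neg h, pvAOuter, dif_neg h]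
      simp

-- skipping a non-digit character one at a time agrees with skipping its whole run
theorem pvBLoop_nondigit (c : Char) (rest : List Char) (m : Int)
    (hc : PySem.Chars.isdigit c = false) : pvBLoop (c :: rest) m = pvBLoop rest (m + 1) := by
  cases rest with
  | nil => rw [pvBLoop]; simp [hc, pvBLoop]
  | cons d rs =>
    by_cases hd : PySem.Chars.isdigit d = true
    · rw [pvBLoop]
      simp only [hc]
      rw [List.takeWhile_cons_of_neg (by simp [hd]), List.dropWhile_cons_of_neg (by simp [hd])]
      simp
    · have hd' : PySem.Chars.isdigit d = false := by simpa using hd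
      rw [pvBLoop]
      simp only [hc]
      rw [List.takeWhile_cons_of_pos (by simp [hd']), List.dropWhile_cons_of_pos (by simp [hd'])]
      conv_rhs => rw [pvBLoop]
      simp only [hd']
      have hpred : (fun x => PySem.Chars.isdigit x == false)
          = (fun x => PySem.Chars.isdigit x == PySem.Chars.isdigit d) := by
        funext x; rw [hd']
      rw [hpred]
      simp only [Bool.false_eq_true, if_false, List.nil_append]
      congr 1
      simp only [List.length_cons]
      push_cast
      ring

-- dropWhile as a drop of the takeWhile length
theorem dropWhile_eq_drop {α : Type} (p : α → Bool) (l : List α) :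
    l.dropWhile p = l.drop (l.takeWhile p).length := by
  induction l with
  | nil => rfl
  | cons x xs ih =>
    by_cases hx : p x = true
    · rw [List.dropWhile_cons_of_pos hx, List.takeWhile_cons_of_pos hx, List.length_cons,
          List.drop_succ_cons, ih]
    · rw [List.dropWhile_cons_of_neg (by simp [hx]), List.takeWhile_cons_of_neg (by simp [hx])]
      rfl

-- main loop correspondence: A's outer loop from index i computes B's run loop on the suffix
theorem pvMain (cs : List Char) : ∀ (k i : Nat), cs.length - i ≤ k →
    ((pvAOuter cs i [] []).1.zip (pvAOuter cs i [] []).2) = pvBLoop (cs.drop i) (i : Int) := by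
  intro k
  induction k with
  | zero =>
    intro i hk
    have hi : ¬ i < cs.length := by omega
    rw [pvAOuter, dif_neg hi, List.drop_eq_nil_of_le (by omega)]
    simp [pvBLoop]
  | succ k ih =>
    intro i hk
    by_cases h : i < cs.length
    · by_cases hd : PySem.Chars.isdigit cs[i] = true
      · -- digit run starting at i
        have hj := pvAInner_gt cs i h hd
        set j := pvAInner cs i with hjdef
        have hchar : j = i + ((cs.drop i).takeWhile PySem.Chars.isdigit).length :=
          pvAInner_char cs (cs.length - i) i (by omega)
        -- A side
        rw [pvAOuter, dif_pos h, dif_pos hd,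
            pvAOuter_acc cs (cs.length - (j + 1)) (j + 1) (by omega)]
        simp only [List.singleton_append, List.nil_append, ← hjdef]
        rw [List.zip_cons_cons, ih (j + 1) (by omega)]
        -- B side
        rw [List.drop_eq_getElem_cons h, pvBLoop]
        simp only [hd]
        have hpred : (fun x => PySem.Chars.isdigit x == true) = PySem.Chars.isdigit := by
          funext x; simp
        rw [hpred]
        have htw : ((cs.drop i).takeWhile PySem.Chars.isdigit).length
            = 1 + ((cs.drop (i + 1)).takeWhile PySem.Chars.isdigit).length := by
          rw [List.drop_eq_getElem_cons h, List.takeWhile_cons_of_pos hd]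
          simp; omega
        have hn : 1 + ((cs.drop (i + 1)).takeWhile PySem.Chars.isdigit).length = j - i := by omega
        have htail : (cs.drop (i + 1)).dropWhile PySem.Chars.isdigit = cs.drop j := by
          rw [dropWhile_eq_drop, List.drop_drop, hchar, htw]
          congr 1; omega
        rw [hn, htail]
        have hcast : ((j - i : Nat) : Int) = (j : Int) - (i : Int) := by omega
        rw [hcast]
        simp only [if_true, List.singleton_append]
        congr 1
        · congr 1
          ring
        · have hidx : (i : Int) + ((j : Int) - (i : Int)) = (j : Int) := by ring
          rw [hidx]
          symm
          by_cases hjl : j < cs.length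
          · have hjl' : pvAInner cs i < cs.length := hjdef ▸ hjl
            have hstop : PySem.Chars.isdigit (cs[j]'hjl) = false := pvAInner_stop cs i hjl'
            rw [List.drop_eq_getElem_cons hjl, pvBLoop_nondigit _ _ _ hstop]
            have hc1 : ((j + 1 : Nat) : Int) = (j : Int) + 1 := by push_cast; ring
            rw [hc1]
          · rw [List.drop_eq_nil_of_le (le_of_not_gt hjl), List.drop_eq_nil_of_le (by omega)]
            simp [pvBLoop]
      · -- non-digit at i
        rw [pvAOuter, dif_pos h, dif_neg hd, ih (i + 1) (by omega),
            List.drop_eq_getElem_cons h,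
            pvBLoop_nondigit _ _ _ (by simpa using hd)]
        norm_num
    · rw [pvAOuter, dif_neg h, List.drop_eq_nil_of_le (by omega)]
      simp [pvBLoop]

-- Python's final 'for (a,b) in zip(...): combos.append((a,b))' is the identity on the zip
theorem foldl_append_id (l acc : List (Int × Int)) :
    l.foldl (fun combos ab => combos ++ [ab]) acc = acc ++ l := by
  induction l generalizing acc with
  | nil => simp
  | cons x xs ih => simp [List.foldl_cons, ih]

-- ===== VERDICT (by name: the statement is the Claim_ definition above) =====
theorem get_line_island_spec : Claim_equal_get_line_island := by
  intro line _
  unfold Spec_get_line_island get_line_island get_line_island_alt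
  have := pvMain line.toList line.toList.length 0 (by omega)
  simp only [List.drop_zero, Nat.cast_zero] at this
  rcases hp : pvAOuter line.toList 0 [] [] with ⟨s, e⟩
  rw [hp] at this
  simp only []
  rw [foldl_append_id, List.nil_append]
  exact this
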